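-- pv_equiv track=rewrite | github.com/esgraham/PDFFieldExtraction | src/core/field_extraction.py | _validate_payment_method
-- ===== SOURCE A (Python) =====
-- from typing import Dict, List, Optional, Tuple, Any, Union, Set
--
-- def _validate_payment_method(value: Any) -> bool:
--     """Validate payment method."""
--     if not value:
--         return False
--
--     valid_methods = [
--         'cash', 'credit card', 'debit card', 'check', 'cheque',
--         'visa', 'mastercard', 'amex', 'discover', 'paypal',
--         'bank transfer', 'wire transfer', 'ach'
--     ]
--
--     return any(method in str(value).lower() for method in valid_methods)
-- ===== SOURCE B (Python) =====
-- _VALID_METHODS = (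
--     'cash', 'credit card', 'debit card', 'check', 'cheque',
--     'visa', 'mastercard', 'amex', 'discover', 'paypal',
--     'bank transfer', 'wire transfer', 'ach'
-- )
--
-- def _validate_payment_method(value):
--     """Validate payment method: position-major single scan of the lowered text."""
--     s = str(value).lower()
--     return any(s.startswith(m, i) for i in range(len(s)) for m in _VALID_METHODS)
-- ===== Notes on version B (the rewrite author's own statement) =====
-- stated objective: alternative
-- what changed: B scans the lowered text position by position, asking at each index whether any payment-method string starts there (one pass over positions with prefix tests), instead of A's 13 independent full substring searches; the redundant falsy guard disappears because an empty scan is already False.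
import Mathlib
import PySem

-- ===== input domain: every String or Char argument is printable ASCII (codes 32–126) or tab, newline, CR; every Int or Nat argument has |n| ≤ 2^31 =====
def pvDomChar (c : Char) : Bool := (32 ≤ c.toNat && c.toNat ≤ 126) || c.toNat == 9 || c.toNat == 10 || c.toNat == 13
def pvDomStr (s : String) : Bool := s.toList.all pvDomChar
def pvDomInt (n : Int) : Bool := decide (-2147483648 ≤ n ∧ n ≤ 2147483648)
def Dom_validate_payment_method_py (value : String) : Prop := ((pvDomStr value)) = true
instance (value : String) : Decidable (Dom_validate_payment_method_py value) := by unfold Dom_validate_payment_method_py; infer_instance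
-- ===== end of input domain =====

-- B replaces A's 13 independent substring searches by one position-major scan with prefix tests; same cost, different traversal.

-- the literal list of valid methods shared verbatim by both Python versions
def pvValidMethods : List String :=
  ["cash", "credit card", "debit card", "check", "cheque",
   "visa", "mastercard", "amex", "discover", "paypal",
   "bank transfer", "wire transfer", "ach"]

-- ===== PORT A =====
def validate_payment_method_py (value : String) : Bool :=
  if value = "" then false            -- 'if not value: return False' (value is a str here)
  else pvValidMethods.any (fun m => PySem.Str.isIn m (PySem.Str.lower value))

-- ===== PORT B =====
-- s.startswith(m, i) with 0 ≤ i is ported by hand as a prefix test on the drop at i (exact for in-range i).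
def validate_payment_method_py_alt (value : String) : Bool :=
  let s : List Char := (PySem.Str.lower value).toList
  (List.range s.length).any (fun i =>
    pvValidMethods.any (fun m => PySem.Chars.startswith (s.drop i) m.toList))

-- ===== PRECONDITION & SPEC =====
def Spec_validate_payment_method_py (value : String) (out : Bool) : Prop := out = validate_payment_method_py_alt value
instance (value : String) (out : Bool) : Decidable (Spec_validate_payment_method_py value out) := by unfold Spec_validate_payment_method_py; infer_instance

-- ===== CLAIM (what is proved, stated in full; the proofs are below) =====
def Claim_equal_validate_payment_method_py : Prop := ∀ (value : String), Dom_validate_payment_method_py value → Spec_validate_payment_method_py value (validate_payment_method_py value)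

-- ===== LEMMAS AND PROOFS =====

-- for a nonempty pattern, 'sub occurs in s' ↔ 'sub starts at some index < length'
theorem pv_infix_iff_scan (s m : List Char) (hm : m ≠ []) :
    (PySem.Chars.isIn m s = true) ↔ ∃ i < s.length, m <+: s.drop i := by
  rw [PySem.Chars.isIn_iff_infix]
  constructor
  · rintro ⟨u, t, rfl⟩
    have hmpos : 0 < m.length := List.length_pos_of_ne_nil hm
    refine ⟨u.length, by simp [List.length_append]; omega, ?_⟩
    rw [List.append_assoc, List.drop_left]
    exact ⟨t, rfl⟩
  · rintro ⟨i, hi, t, ht⟩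
    exact ⟨s.take i, t, by rw [List.append_assoc, ht, List.take_append_drop]⟩

theorem validate_payment_method_py_spec_aux (value : String) :
    validate_payment_method_py value = validate_payment_method_py_alt value := by
  unfold validate_payment_method_py validate_payment_method_py_alt
  by_cases hv : value = ""
  · subst hv; decide
  · simp only [if_neg hv]
    rw [Bool.eq_iff_iff]
    simp only [List.any_eq_true, List.mem_range, PySem.Str.isIn_eq,
      PySem.Str.toList_lower, PySem.Chars.startswith_iff]
    constructor
    · rintro ⟨m, hmem, h⟩
      have hm : m.toList ≠ [] := by fin_cases hmem <;> decide
      obtain ⟨i, hi, hp⟩ := (pv_infix_iff_scan _ _ hm).mp h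
      exact ⟨i, hi, m, hmem, hp⟩
    · rintro ⟨i, hi, m, hmem, hp⟩
      have hm : m.toList ≠ [] := by fin_cases hmem <;> decide
      exact ⟨m, hmem, (pv_infix_iff_scan _ m.toList hm).mpr ⟨i, hi, hp⟩⟩

-- ===== VERDICT (by name: the statement is the Claim_ definition above) =====
theorem validate_payment_method_py_spec : Claim_equal_validate_payment_method_py := by
  intro value _
  exact validate_payment_method_py_spec_aux value
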